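-- pv_equiv track=rewrite | github.com/j4n1k/slapstack-battery-management | 1_environment/slapstack/slapstack/core_state_agv_manager.py | __get_aisle_rows
-- ===== SOURCE A (Python) =====
-- from collections import defaultdict
--
-- def __get_aisle_rows(aisle_tiles):
--     """
--     Creates dictionary mapping aisle row coordinates to aisle column
--     coordinates.
--
--     :param aisle_tiles: The tiles to extract coordinates from.
--     :return:
--     """
--     row_keys = []
--     rows = defaultdict(list)
--     row_lens = defaultdict(int)
--     for tile in aisle_tiles:
--         if tile[0] not in rows:
--             row_keys.append(tile[0])
--         rows[tile[0]].append(tile[1])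
--         row_lens[tile[0]] += 1
--     return row_keys, row_lens, rows
-- ===== SOURCE B (Python) =====
-- from collections import defaultdict
--
-- def __get_aisle_rows(aisle_tiles):
--     row_keys = []
--     for r, _ in aisle_tiles:
--         if r not in row_keys:
--             row_keys.append(r)
--     rows = defaultdict(list)
--     row_lens = defaultdict(int)
--     for k in row_keys:
--         cols = [c for r, c in aisle_tiles if r == k]
--         rows[k] = cols
--         row_lens[k] = len(cols)
--     return row_keys, row_lens, rows
-- ===== Notes on version B (the rewrite author's own statement) =====
-- stated objective: alternative
-- what changed: A makes one pass maintaining three structures with incremental dict grouping; B first scans for the distinct row keys, then for each key makes a separate full filtering pass over the tiles to collect that row's columns and count, assigning each dict entry once.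
import Mathlib
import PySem

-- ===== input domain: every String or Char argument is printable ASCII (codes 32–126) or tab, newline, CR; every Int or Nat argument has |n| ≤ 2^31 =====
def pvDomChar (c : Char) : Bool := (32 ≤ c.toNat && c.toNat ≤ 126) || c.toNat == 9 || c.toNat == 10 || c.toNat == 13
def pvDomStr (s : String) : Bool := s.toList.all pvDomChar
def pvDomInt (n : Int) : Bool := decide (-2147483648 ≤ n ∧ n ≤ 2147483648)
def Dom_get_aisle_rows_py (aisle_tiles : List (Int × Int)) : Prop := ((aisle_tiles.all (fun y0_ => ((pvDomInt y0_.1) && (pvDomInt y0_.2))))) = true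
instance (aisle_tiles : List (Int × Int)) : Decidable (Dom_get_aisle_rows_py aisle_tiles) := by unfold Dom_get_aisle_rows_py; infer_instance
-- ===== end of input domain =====

-- B first scans for the distinct row keys, then for each key re-scans the tiles to
-- collect that row's columns and count (objective: alternative — staged nested scans
-- instead of A's single pass maintaining three structures; not faster).

-- ===== PORT A =====
-- one loop maintaining row_keys, row_lens and rows together, as in the Python
def get_aisle_rows_py (aisle_tiles : List (Int × Int)) : List Int × (List (Int × Int)) × (List (Int × List Int)) :=
  let st := aisle_tiles.foldl
    (fun (s : List Int × PySem.Dict Int Int × PySem.Dict Int (List Int)) tile =>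
      let row_keys := if s.2.2.contains tile.1 then s.1 else s.1 ++ [tile.1]
      let row_lens := s.2.1.modify tile.1 0 (· + 1)
      let rows := s.2.2.modify tile.1 [] (· ++ [tile.2])
      (row_keys, row_lens, rows))
    ([], PySem.Dict.empty, PySem.Dict.empty)
  (st.1, st.2.1.items, st.2.2.items)

-- ===== PORT B =====
-- first loop: distinct keys by membership test; second loop: per-key filtering pass
def get_aisle_rows_py_alt (aisle_tiles : List (Int × Int)) : List Int × (List (Int × Int)) × (List (Int × List Int)) :=
  let row_keys := aisle_tiles.foldl
    (fun (ks : List Int) tile => if ks.contains tile.1 then ks else ks ++ [tile.1]) []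
  let st := row_keys.foldl
    (fun (s : PySem.Dict Int (List Int) × PySem.Dict Int Int) k =>
      let cols := (aisle_tiles.filter (fun t => t.1 == k)).map (·.2)
      (s.1.insert k cols, s.2.insert k (cols.length : Int)))
    (PySem.Dict.empty, PySem.Dict.empty)
  (row_keys, st.2.items, st.1.items)

-- ===== PRECONDITION & SPEC =====
def Spec_get_aisle_rows_py (aisle_tiles : List (Int × Int)) (out : List Int × (List (Int × Int)) × (List (Int × List Int))) : Prop := out = get_aisle_rows_py_alt aisle_tiles
instance (aisle_tiles : List (Int × Int)) (out : List Int × (List (Int × Int)) × (List (Int × List Int))) : Decidable (Spec_get_aisle_rows_py aisle_tiles out) := by unfold Spec_get_aisle_rows_py; infer_instance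

-- ===== CLAIM (what is proved, stated in full; the proofs are below) =====
def Claim_equal_get_aisle_rows_py : Prop := ∀ (aisle_tiles : List (Int × Int)), Dom_get_aisle_rows_py aisle_tiles → Spec_get_aisle_rows_py aisle_tiles (get_aisle_rows_py aisle_tiles)

-- ===== LEMMAS AND PROOFS =====

-- distinct first elements in first-appearance order (B's first loop)
def pvDK (l : List (Int × Int)) : List Int :=
  l.foldl (fun (ks : List Int) tile => if ks.contains tile.1 then ks else ks ++ [tile.1]) []

def pvRows (l : List (Int × Int)) : List (Int × List Int) :=
  (pvDK l).map (fun k => (k, (l.filter (fun t => t.1 == k)).map (·.2)))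

def pvLens (l : List (Int × Int)) : List (Int × Int) :=
  (pvDK l).map (fun k => (k, (((l.filter (fun t => t.1 == k)).map (·.2)).length : Int)))

theorem mem_dkfold (l : List (Int × Int)) (init : List Int) (x : Int) :
    x ∈ l.foldl (fun (ks : List Int) tile => if ks.contains tile.1 then ks else ks ++ [tile.1]) init
      ↔ x ∈ init ∨ x ∈ l.map (·.1) := by
  induction l generalizing init with
  | nil => simp
  | cons t l ih =>
    simp only [List.foldl_cons, ih, List.map_cons, List.mem_cons]
    by_cases hc : init.contains t.1
    · have : t.1 ∈ init := by simpa using hc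
      simp only [hc, if_true]
      constructor
      · rintro (h | h) <;> tauto
      · rintro (h | h | h)
        · left; exact h
        · left; exact h ▸ this
        · right; exact h
    · simp only [hc]
      constructor
      · rintro (h | h)
        · rcases List.mem_append.mp h with h | h
          · left; exact h
          · right; left; simpa using h
        · right; right; exact h
      · rintro (h | h | h)
        · left; exact List.mem_append.mpr (Or.inl h)
        · left; exact List.mem_append.mpr (Or.inr (by simpa using h))
        · right; exact h

theorem nodup_dkfold (l : List (Int × Int)) (init : List Int) (h : init.Nodup) :
    (l.foldl (fun (ks : List Int) tile => if ks.contains tile.1 then ks else ks ++ [tile.1]) init).Nodup := by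
  induction l generalizing init with
  | nil => simpa using h
  | cons t l ih =>
    simp only [List.foldl_cons]
    by_cases hc : init.contains t.1
    · simp only [hc, if_true]; exact ih _ h
    · rw [if_neg hc]
      apply ih
      refine List.Nodup.append h (by simp) ?_
      intro a ha hb
      simp only [List.mem_singleton] at hb
      exact absurd (by simpa [hb] using ha) (by simpa using hc)

theorem mem_pvDK (l : List (Int × Int)) (x : Int) : x ∈ pvDK l ↔ x ∈ l.map (·.1) := by
  unfold pvDK; rw [mem_dkfold]; simp

theorem nodup_pvDK (l : List (Int × Int)) : (pvDK l).Nodup := nodup_dkfold l [] (by simp)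

theorem pvDK_append_singleton (l : List (Int × Int)) (t : Int × Int) :
    pvDK (l ++ [t]) = if (pvDK l).contains t.1 then pvDK l else pvDK l ++ [t.1] := by
  unfold pvDK; rw [List.foldl_append]; rfl

-- characterisation of A's loop
theorem A_fold_eq (l : List (Int × Int)) :
    l.foldl
      (fun (s : List Int × PySem.Dict Int Int × PySem.Dict Int (List Int)) tile =>
        let row_keys := if s.2.2.contains tile.1 then s.1 else s.1 ++ [tile.1]
        let row_lens := s.2.1.modify tile.1 0 (· + 1)
        let rows := s.2.2.modify tile.1 [] (· ++ [tile.2])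
        (row_keys, row_lens, rows))
      ([], PySem.Dict.empty, PySem.Dict.empty)
    = (pvDK l, PySem.Dict.mk (pvLens l), PySem.Dict.mk (pvRows l)) := by
  induction l using List.reverseRecOn with
  | nil => rfl
  | append_singleton l t ih =>
    rw [List.foldl_append, ih]
    simp only [List.foldl_cons, List.foldl_nil]
    have hkr : (PySem.Dict.mk (pvRows l)).keys = pvDK l := by
      simp [PySem.Dict.keys, pvRows, List.map_map, Function.comp_def]
    have hkl : (PySem.Dict.mk (pvLens l)).keys = pvDK l := by
      simp [PySem.Dict.keys, pvLens, List.map_map, Function.comp_def]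
    have hndr : (PySem.Dict.mk (pvRows l)).keys.Nodup := by rw [hkr]; exact nodup_pvDK l
    have hndl : (PySem.Dict.mk (pvLens l)).keys.Nodup := by rw [hkl]; exact nodup_pvDK l
    have hcr : (PySem.Dict.mk (pvRows l)).contains t.1 = (pvDK l).contains t.1 := by
      rw [PySem.Dict.contains_eq_decide_mem_keys, hkr]
      simp
    have hcl : (PySem.Dict.mk (pvLens l)).contains t.1 = (pvDK l).contains t.1 := by
      rw [PySem.Dict.contains_eq_decide_mem_keys, hkl]
      simp
    by_cases hc : (pvDK l).contains t.1 = true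
    · have hmem : t.1 ∈ pvDK l := by simpa using hc
      have hDK : pvDK (l ++ [t]) = pvDK l := by rw [pvDK_append_singleton, if_pos hc]
      refine Prod.ext ?_ (Prod.ext ?_ ?_) <;> simp only
      · rw [hcr, if_pos hc, hDK]
      · -- lens component
        apply PySem.Dict.ext
        simp only [PySem.Dict.modify]
        have hget : (PySem.Dict.mk (pvLens l)).getD t.1 0
            = (((l.filter (fun x => x.1 == t.1)).map (·.2)).length : Int) := by
          apply PySem.Dict.getD_of_mem_items _ _ hndl
          have : (t.1, (((l.filter (fun x => x.1 == t.1)).map (·.2)).length : Int)) ∈ pvLens l :=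
            List.mem_map.mpr ⟨t.1, hmem, rfl⟩
          exact this
        rw [PySem.Dict.items_insert_of_contains _ _ (hcl.trans hc), hget]
        unfold pvLens
        rw [hDK, List.map_map]
        apply List.map_congr_left
        intro k hk
        by_cases hkt : k = t.1
        · subst hkt
          simp [List.filter_append]
        · have : ¬ (k == t.1) = true := by simpa using hkt
          simp [Function.comp, this, List.filter_append, Ne.symm hkt]
      · -- rows component
        apply PySem.Dict.ext
        simp only [PySem.Dict.modify]
        have hget : (PySem.Dict.mk (pvRows l)).getD t.1 []
            = (l.filter (fun x => x.1 == t.1)).map (·.2) := by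
          apply PySem.Dict.getD_of_mem_items _ _ hndr
          have : (t.1, (l.filter (fun x => x.1 == t.1)).map (·.2)) ∈ pvRows l :=
            List.mem_map.mpr ⟨t.1, hmem, rfl⟩
          exact this
        rw [PySem.Dict.items_insert_of_contains _ _ (hcr.trans hc), hget]
        unfold pvRows
        rw [hDK, List.map_map]
        apply List.map_congr_left
        intro k hk
        by_cases hkt : k = t.1
        · subst hkt
          simp [List.filter_append]
        · have : ¬ (k == t.1) = true := by simpa using hkt
          simp [Function.comp, this, List.filter_append, Ne.symm hkt]
    · have hc' : (pvDK l).contains t.1 = false := by simpa using hc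
      have hnmem : t.1 ∉ pvDK l := by simpa using hc
      have hnofst : ∀ x ∈ l, ¬ (x.1 == t.1) = true := by
        intro x hx hbe
        exact hnmem ((mem_pvDK l t.1).mpr (List.mem_map.mpr ⟨x, hx, by simpa using hbe.symm⟩))
      have hfilt : l.filter (fun x => x.1 == t.1) = [] :=
        List.filter_eq_nil_iff.mpr hnofst
      have hDK : pvDK (l ++ [t]) = pvDK l ++ [t.1] := by
        rw [pvDK_append_singleton, if_neg (by simpa using hnmem)]
      refine Prod.ext ?_ (Prod.ext ?_ ?_) <;> simp only
      · rw [hcr, hc', hDK]; simp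
      · -- lens component
        apply PySem.Dict.ext
        simp only [PySem.Dict.modify]
        rw [PySem.Dict.items_insert_of_not_contains _ _ (hcl.trans hc'),
            PySem.Dict.getD_of_not_contains _ _ (hcl.trans hc')]
        unfold pvLens
        rw [hDK, List.map_append]
        congr 1
        · apply List.map_congr_left
          intro k hk
          have hkt : k ≠ t.1 := fun h => hnmem (h ▸ hk)
          have : ¬ (t.1 == k) = true := by simpa using (Ne.symm hkt)
          simp [List.filter_append, this]
        · simp [List.filter_append, hfilt]
      · -- rows component
        apply PySem.Dict.ext
        simp only [PySem.Dict.modify]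
        rw [PySem.Dict.items_insert_of_not_contains _ _ (hcr.trans hc'),
            PySem.Dict.getD_of_not_contains _ _ (hcr.trans hc')]
        unfold pvRows
        rw [hDK, List.map_append]
        congr 1
        · apply List.map_congr_left
          intro k hk
          have hkt : k ≠ t.1 := fun h => hnmem (h ▸ hk)
          have : ¬ (t.1 == k) = true := by simpa using (Ne.symm hkt)
          simp [List.filter_append, this]
        · simp [List.filter_append, hfilt]

-- B's second loop splits into two independent insert loops
theorem pair_foldl {α β γ : Type} (l : List γ) (f : α → γ → α) (g : β → γ → β) (a : α) (b : β) :
    l.foldl (fun (s : α × β) x => (f s.1 x, g s.2 x)) (a, b) = (l.foldl f a, l.foldl g b) := by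
  induction l generalizing a b with
  | nil => rfl
  | cons x l ih => simp only [List.foldl_cons]; exact ih _ _

-- ===== VERDICT (by name: the statement is the Claim_ definition above) =====
theorem get_aisle_rows_py_spec : Claim_equal_get_aisle_rows_py := by
  intro aisle_tiles _
  unfold Spec_get_aisle_rows_py get_aisle_rows_py get_aisle_rows_py_alt
  rw [A_fold_eq]
  have hsplit := pair_foldl (pvDK aisle_tiles)
    (fun (d : PySem.Dict Int (List Int)) k =>
      d.insert k ((aisle_tiles.filter (fun t => t.1 == k)).map (·.2)))
    (fun (d : PySem.Dict Int Int) k =>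
      d.insert k (((aisle_tiles.filter (fun t => t.1 == k)).map (·.2)).length : Int))
    PySem.Dict.empty PySem.Dict.empty
  show _ = (pvDK aisle_tiles,
    ((pvDK aisle_tiles).foldl
      (fun (s : PySem.Dict Int (List Int) × PySem.Dict Int Int) k =>
        (s.1.insert k ((aisle_tiles.filter (fun t => t.1 == k)).map (·.2)),
         s.2.insert k (((aisle_tiles.filter (fun t => t.1 == k)).map (·.2)).length : Int)))
      (PySem.Dict.empty, PySem.Dict.empty)).2.items,
    ((pvDK aisle_tiles).foldl
      (fun (s : PySem.Dict Int (List Int) × PySem.Dict Int Int) k =>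
        (s.1.insert k ((aisle_tiles.filter (fun t => t.1 == k)).map (·.2)),
         s.2.insert k (((aisle_tiles.filter (fun t => t.1 == k)).map (·.2)).length : Int)))
      (PySem.Dict.empty, PySem.Dict.empty)).1.items)
  rw [hsplit]
  have hnd : ((pvDK aisle_tiles).map id).Nodup := by
    simpa using nodup_pvDK aisle_tiles
  have hfresh1 : ∀ k ∈ pvDK aisle_tiles, (PySem.Dict.empty : PySem.Dict Int (List Int)).contains (id k) = false := by
    intro k _; exact PySem.Dict.contains_empty _
  have hfresh2 : ∀ k ∈ pvDK aisle_tiles, (PySem.Dict.empty : PySem.Dict Int Int).contains (id k) = false := by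
    intro k _; exact PySem.Dict.contains_empty _
  have h1 := PySem.Dict.items_foldl_insert_fresh (d := (PySem.Dict.empty : PySem.Dict Int (List Int)))
    (l := pvDK aisle_tiles) (k := id)
    (v := fun k => (aisle_tiles.filter (fun t => t.1 == k)).map (·.2)) hfresh1 hnd
  have h2 := PySem.Dict.items_foldl_insert_fresh (d := (PySem.Dict.empty : PySem.Dict Int Int))
    (l := pvDK aisle_tiles) (k := id)
    (v := fun k => (((aisle_tiles.filter (fun t => t.1 == k)).map (·.2)).length : Int)) hfresh2 hnd
  simp only [id] at h1 h2
  refine Prod.ext rfl (Prod.ext ?_ ?_) <;> simp only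
  · rw [h2]
    simp [PySem.Dict.empty, pvLens]
  · rw [h1]
    simp [PySem.Dict.empty, pvRows]
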